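-- pv_equiv track=rewrite | github.com/shivek-sahay/Re-Learning | Problem-Solving/Heycoach/Assignment/coin_chase_on_main_street.py | maximizeCoins
-- ===== SOURCE A (Python) =====
-- def maximizeCoins(coins):
--   len_arr = len(coins)
--   ram_coins = shyam_coins = 0
--   ans = []
--
--   for i in range(len_arr//2):
--     ram_coins += coins[i]
--     shyam_coins += coins[len_arr - 1 - i]
--
--     if ram_coins > shyam_coins:
--       ans.append(1)
--     elif ram_coins < shyam_coins:
--       ans.append(-1)
--     else:
--       ans.append(0)
--   return ans
-- ===== SOURCE B (Python) =====
-- def maximizeCoins(coins):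
--     # Peel the array from both ends with two stacks, tracking only the signed
--     # difference d = (Ram's total) - (Shyam's total); emit sign(d) each round.
--     front = coins[::-1]   # .pop() yields coins[0], coins[1], ...
--     back = list(coins)    # .pop() yields coins[-1], coins[-2], ...
--     d = 0
--     ans = []
--     for _ in range(len(coins) // 2):
--         d += front.pop() - back.pop()
--         ans.append((d > 0) - (d < 0))
--     return ans
-- ===== Notes on version B (the rewrite author's own statement) =====
-- stated objective: alternative
-- what changed: A indexes into the array from both ends and keeps two running totals that it compares; B destructively peels one element off each end of two stacks per round and maintains only the single signed difference d, emitting sign(d) with a branch-free bool-subtraction expression.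
import Mathlib
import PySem

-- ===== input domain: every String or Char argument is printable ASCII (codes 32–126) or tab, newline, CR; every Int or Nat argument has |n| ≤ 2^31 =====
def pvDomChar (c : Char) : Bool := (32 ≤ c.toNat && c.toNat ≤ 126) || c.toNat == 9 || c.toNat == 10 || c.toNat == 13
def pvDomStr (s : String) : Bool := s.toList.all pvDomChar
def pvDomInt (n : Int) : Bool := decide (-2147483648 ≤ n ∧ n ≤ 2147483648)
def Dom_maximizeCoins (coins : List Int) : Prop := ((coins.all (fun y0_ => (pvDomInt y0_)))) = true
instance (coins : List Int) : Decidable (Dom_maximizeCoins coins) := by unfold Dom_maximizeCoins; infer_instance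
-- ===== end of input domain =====

-- B peels one element off each end of two stacks per round and keeps only the single signed difference d, emitting sign(d); an alternative decomposition of A's two-running-sums index loop, same cost.


-- ===== PORT A =====
def maximizeCoins (coins : List Int) : List Int :=
  let len_arr : Int := coins.length
  let st :=
    (PySem.List.pyRange 0 (PySem.Int.floordiv len_arr 2) 1).foldl
      (fun (st : Int × Int × List Int) i =>
        let ram := st.1 + PySem.List.pyGetD coins i 0
        let shyam := st.2.1 + PySem.List.pyGetD coins (len_arr - 1 - i) 0
        let ans :=
          if ram > shyam then st.2.2 ++ [1]
          else if ram < shyam then st.2.2 ++ [(-1 : Int)]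
          else st.2.2 ++ [0]
        (ram, shyam, ans)) (0, 0, [])
  st.2.2

-- ===== PORT B =====
-- the peel loop of Source B: 'for _ in range(k)' becomes fuel recursion on k;
-- each round pops the top (= last element) of both stacks and conses sign(d);
-- the '.getD 0' only totalises .pop() on an empty stack, which the fuel k ≤ n//2 never reaches
def pvPeel : Nat → List Int → List Int → Int → List Int
  | 0, _, _, _ => []
  | k + 1, front, back, d =>
    let d' := d + front.getLast?.getD 0 - back.getLast?.getD 0
    (if d' > 0 then (1 : Int) else if d' < 0 then -1 else 0) ::
      pvPeel k front.dropLast back.dropLast d'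

def maximizeCoins_alt (coins : List Int) : List Int :=
  pvPeel (coins.length / 2) coins.reverse coins 0

-- ===== PRECONDITION & SPEC =====
def Spec_maximizeCoins (coins : List Int) (out : List Int) : Prop := out = maximizeCoins_alt coins
instance (coins : List Int) (out : List Int) : Decidable (Spec_maximizeCoins coins out) := by unfold Spec_maximizeCoins; infer_instance

-- ===== CLAIM (what is proved, stated in full; the proofs are below) =====
def Claim_equal_maximizeCoins : Prop := ∀ (coins : List Int), Dom_maximizeCoins coins → Spec_maximizeCoins coins (maximizeCoins coins)

-- ===== LEMMAS AND PROOFS =====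

-- three-way comparison value shared by both characterisations
def pvCmp (a b : Int) : Int := if a > b then 1 else if a < b then -1 else 0

lemma floordiv_two (n : Nat) : PySem.Int.floordiv (n : Int) 2 = ((n / 2 : Nat) : Int) := by
  exact_mod_cast PySem.Int.floordiv_natCast n 2

-- the fused loop of A, characterised as a map over List.range
lemma A_loop (coins : List Int) (m : Nat) (hm : m ≤ coins.length / 2) :
    (PySem.List.pyRange 0 (m : Int) 1).foldl
      (fun (st : Int × Int × List Int) i =>
        let ram := st.1 + PySem.List.pyGetD coins i 0
        let shyam := st.2.1 + PySem.List.pyGetD coins ((coins.length : Int) - 1 - i) 0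
        let ans :=
          if ram > shyam then st.2.2 ++ [1]
          else if ram < shyam then st.2.2 ++ [(-1 : Int)]
          else st.2.2 ++ [0]
        (ram, shyam, ans)) (0, 0, []) =
    ((coins.take m).sum, (coins.reverse.take m).sum,
      (List.range m).map
        (fun j => pvCmp ((coins.take (j + 1)).sum) ((coins.reverse.take (j + 1)).sum))) := by
  induction m with
  | zero => simp [PySem.List.pyRange_one_eq_nil]
  | succ m ih =>
    have hm' : m ≤ coins.length / 2 := Nat.le_of_succ_le hm
    have hmn : m < coins.length := by omega
    have hcast : ((m + 1 : Nat) : Int) = (m : Int) + 1 := by push_cast; ring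
    rw [hcast, PySem.List.pyRange_one_succ_right (by positivity), List.foldl_append,
      List.range_succ, List.map_append, ih hm']
    simp only [List.foldl_cons, List.foldl_nil, List.map_cons, List.map_nil]
    have hget1 : PySem.List.pyGetD coins ((m : Nat) : Int) 0 = coins[m] := by
      simp [PySem.List.pyGetD_natCast, List.getD_eq_getElem?_getD, List.getElem?_eq_getElem hmn]
    have hidx : ((coins.length : Int) - 1 - (m : Int)) = ((coins.length - 1 - m : Nat) : Int) := by
      omega
    have hmn' : coins.length - 1 - m < coins.length := by omega
    have hmr : m < coins.reverse.length := by simpa using hmn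
    have hget2 : PySem.List.pyGetD coins ((coins.length : Int) - 1 - (m : Int)) 0
        = coins.reverse[m] := by
      rw [hidx]
      simp [PySem.List.pyGetD_natCast, List.getD_eq_getElem?_getD, List.getElem?_eq_getElem hmn',
        List.getElem_reverse]
    have hS : (coins.take (m + 1)).sum = (coins.take m).sum + coins[m] := by
      rw [List.take_add_one, List.getElem?_eq_getElem hmn]
      simp only [Option.toList_some, List.sum_append, List.sum_cons, List.sum_nil, add_zero]
    have hT : (coins.reverse.take (m + 1)).sum = (coins.reverse.take m).sum + coins.reverse[m] := by
      rw [List.take_add_one, List.getElem?_eq_getElem hmr]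
      simp only [Option.toList_some, List.sum_append, List.sum_cons, List.sum_nil, add_zero]
    simp only [hget1, hget2, hS, hT, pvCmp]
    split_ifs <;> simp

-- B's peel loop, characterised: starting after i rounds, it produces the signs for rounds i..i+k
lemma B_loop (coins : List Int) (i k : Nat) (h : i + k ≤ coins.length / 2) :
    pvPeel k ((coins.drop i).reverse) (coins.take (coins.length - i))
      ((coins.take i).sum - (coins.reverse.take i).sum) =
    (List.range' i k).map
      (fun j => pvCmp ((coins.take (j + 1)).sum) ((coins.reverse.take (j + 1)).sum)) := by
  induction k generalizing i with
  | zero => simp [pvPeel]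
  | succ k ih =>
    have hin : i < coins.length := by omega
    have hir : i < coins.reverse.length := by simpa using hin
    have hfront : ((coins.drop i).reverse).getLast?.getD 0 = coins[i] := by
      rw [List.getLast?_reverse]
      simp [List.head?_drop, List.getElem?_eq_getElem hin]
    have hlen : (coins.take (coins.length - i)).length = coins.length - i := by
      simp
    have hback : (coins.take (coins.length - i)).getLast?.getD 0 = coins.reverse[i] := by
      have h1 : coins.length - i - 1 < coins.length - i := by omega
      have h2 : coins.length - i - 1 < coins.length := by omega
      rw [List.getLast?_eq_getElem?, hlen, List.getElem?_take_of_lt h1,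
        List.getElem?_eq_getElem h2, Option.getD_some]
      simp only [List.getElem_reverse]
      congr 1
      omega
    have hdfront : ((coins.drop i).reverse).dropLast = (coins.drop (i + 1)).reverse := by
      rw [List.dropLast_reverse, List.tail_drop]
    have hdback : (coins.take (coins.length - i)).dropLast = coins.take (coins.length - (i + 1)) := by
      rw [List.dropLast_eq_take, hlen, List.take_take]
      congr 1
      omega
    have hS : (coins.take (i + 1)).sum = (coins.take i).sum + coins[i] := by
      rw [List.take_add_one, List.getElem?_eq_getElem hin]
      simp only [Option.toList_some, List.sum_append, List.sum_cons, List.sum_nil, add_zero]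
    have hT : (coins.reverse.take (i + 1)).sum = (coins.reverse.take i).sum + coins.reverse[i] := by
      rw [List.take_add_one, List.getElem?_eq_getElem hir]
      simp only [Option.toList_some, List.sum_append, List.sum_cons, List.sum_nil, add_zero]
    rw [List.range'_succ, List.map_cons]
    simp only [pvPeel, hfront, hback, hdfront, hdback]
    have hd : (coins.take i).sum - (coins.reverse.take i).sum + coins[i] - coins.reverse[i]
        = (coins.take (i + 1)).sum - (coins.reverse.take (i + 1)).sum := by
      rw [hS, hT]; ring
    rw [hd, ih (i + 1) (by omega)]
    have : (if (coins.take (i + 1)).sum - (coins.reverse.take (i + 1)).sum > 0 then (1 : Int)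
        else if (coins.take (i + 1)).sum - (coins.reverse.take (i + 1)).sum < 0 then -1 else 0)
        = pvCmp ((coins.take (i + 1)).sum) ((coins.reverse.take (i + 1)).sum) := by
      unfold pvCmp; split_ifs <;> omega
    rw [this]

theorem pv_main (coins : List Int) : maximizeCoins coins = maximizeCoins_alt coins := by
  unfold maximizeCoins maximizeCoins_alt
  simp only [floordiv_two]
  rw [A_loop coins (coins.length / 2) le_rfl]
  have hB := B_loop coins 0 (coins.length / 2) (by omega)
  simp only [List.drop_zero, Nat.sub_zero, List.take_length, List.take_zero, List.sum_nil,
    sub_zero] at hB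
  rw [hB, ← List.range_eq_range']

-- ===== VERDICT (by name: the statement is the Claim_ definition above) =====
theorem maximizeCoins_spec : Claim_equal_maximizeCoins := by
  intro coins _
  exact pv_main coins
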